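-- pv_equiv track=rewrite | github.com/rolansy/git-me-ai | backend/ai_agent.py | _generate_api_description
-- ===== SOURCE A (Python) =====
-- from typing import Dict, Tuple, List
--
-- def _generate_api_description(repo_name: str, dependencies: List[str], language: str) -> str:
--     """Generate smart API description"""
--     if any('fastapi' in dep.lower() for dep in dependencies):
--         framework = "FastAPI"
--     elif any('flask' in dep.lower() for dep in dependencies):
--         framework = "Flask"
--     elif any('express' in dep.lower() for dep in dependencies):
--         framework = "Express.js"
--     elif any('django' in dep.lower() for dep in dependencies):
--         framework = "Django REST"
--     else:
--         framework = language
--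
--     # Infer API purpose from name
--     if any(word in repo_name.lower() for word in ['auth', 'login', 'user']):
--         return f"A {framework} authentication and user management API"
--     elif any(word in repo_name.lower() for word in ['payment', 'billing', 'transaction']):
--         return f"A {framework} payment processing API"
--     elif any(word in repo_name.lower() for word in ['data', 'analytics', 'metrics']):
--         return f"A {framework} data analytics and metrics API"
--     elif any(word in repo_name.lower() for word in ['notification', 'email', 'sms']):
--         return f"A {framework} notification and messaging API"
--     else:
--         return f"A RESTful API service built with {framework}"
-- ===== SOURCE B (Python) =====
-- # Min-priority-rank reduction: one pass over dependencies computing each dep's marker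
-- # rank and reducing with min, plus a flattened keyword->category table reduced with min,
-- # instead of A's two ordered any() elif cascades. Correct because the first match in
-- # priority order is exactly the minimum matched priority.
--
-- _MARKERS = ["fastapi", "flask", "express", "django"]
-- _NAMES = ["FastAPI", "Flask", "Express.js", "Django REST"]
-- _KEYWORDS = [("auth", 0), ("login", 0), ("user", 0),
--              ("payment", 1), ("billing", 1), ("transaction", 1),
--              ("data", 2), ("analytics", 2), ("metrics", 2),
--              ("notification", 3), ("email", 3), ("sms", 3)]
-- _SUFFIXES = ["authentication and user management API",
--              "payment processing API",
--              "data analytics and metrics API",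
--              "notification and messaging API"]
--
-- def _rank(d):
--     for i, m in enumerate(_MARKERS):
--         if m in d:
--             return i
--     return len(_MARKERS)
--
-- def _generate_api_description(repo_name, dependencies, language):
--     rank = 4
--     for dep in dependencies:
--         rank = min(rank, _rank(dep.lower()))
--     framework = _NAMES[rank] if rank < 4 else language
--     name_l = repo_name.lower()
--     best = 4
--     for k, cat in _KEYWORDS:
--         if k in name_l:
--             best = min(best, cat)
--     if best < 4:
--         return f"A {framework} {_SUFFIXES[best]}"
--     return f"A RESTful API service built with {framework}"
-- ===== Notes on version B (the rewrite author's own statement) =====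
-- stated objective: alternative
-- what changed: Replaces A's two ordered elif/any cascades by a min-priority-rank reduction: one pass over dependencies computing each dependency's marker rank and folding with min, and a flattened keyword->category table folded with min over the repo name, then indexing name/suffix arrays by the minimal rank.
import Mathlib
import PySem

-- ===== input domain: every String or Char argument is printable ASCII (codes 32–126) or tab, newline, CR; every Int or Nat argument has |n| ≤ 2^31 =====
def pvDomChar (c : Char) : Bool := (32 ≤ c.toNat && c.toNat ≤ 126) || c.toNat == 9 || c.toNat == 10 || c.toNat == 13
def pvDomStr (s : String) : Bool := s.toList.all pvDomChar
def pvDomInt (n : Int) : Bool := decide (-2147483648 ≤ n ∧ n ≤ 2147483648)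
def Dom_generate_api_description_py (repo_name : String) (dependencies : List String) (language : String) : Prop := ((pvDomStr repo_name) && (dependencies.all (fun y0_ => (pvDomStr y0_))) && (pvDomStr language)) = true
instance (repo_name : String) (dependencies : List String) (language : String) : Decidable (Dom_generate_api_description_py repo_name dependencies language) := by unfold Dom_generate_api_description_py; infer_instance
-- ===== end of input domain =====

-- B replaces A's two ordered elif cascades by a min-priority-rank reduction over a flattened rule table (alternative; same output).

-- ===== PORT A =====
-- A's purpose cascade over repo_name, given the already-computed framework string.
def pvDescA (repo_name : String) (framework : String) : String :=
  if ["auth", "login", "user"].any (fun w => PySem.Str.isIn w (PySem.Str.lower repo_name)) then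
    "A " ++ framework ++ " authentication and user management API"
  else if ["payment", "billing", "transaction"].any (fun w => PySem.Str.isIn w (PySem.Str.lower repo_name)) then
    "A " ++ framework ++ " payment processing API"
  else if ["data", "analytics", "metrics"].any (fun w => PySem.Str.isIn w (PySem.Str.lower repo_name)) then
    "A " ++ framework ++ " data analytics and metrics API"
  else if ["notification", "email", "sms"].any (fun w => PySem.Str.isIn w (PySem.Str.lower repo_name)) then
    "A " ++ framework ++ " notification and messaging API"
  else
    "A RESTful API service built with " ++ framework

def generate_api_description_py (repo_name : String) (dependencies : List String) (language : String) : String :=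
  pvDescA repo_name
    (if dependencies.any (fun dep => PySem.Str.isIn "fastapi" (PySem.Str.lower dep)) then "FastAPI"
     else if dependencies.any (fun dep => PySem.Str.isIn "flask" (PySem.Str.lower dep)) then "Flask"
     else if dependencies.any (fun dep => PySem.Str.isIn "express" (PySem.Str.lower dep)) then "Express.js"
     else if dependencies.any (fun dep => PySem.Str.isIn "django" (PySem.Str.lower dep)) then "Django REST"
     else language)

-- ===== PORT B =====
def pvMarkers : List String := ["fastapi", "flask", "express", "django"]
def pvNames : List String := ["FastAPI", "Flask", "Express.js", "Django REST"]
def pvKeywords : List (String × Nat) :=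
  [("auth", 0), ("login", 0), ("user", 0),
   ("payment", 1), ("billing", 1), ("transaction", 1),
   ("data", 2), ("analytics", 2), ("metrics", 2),
   ("notification", 3), ("email", 3), ("sms", 3)]
def pvSuffixes : List String :=
  ["authentication and user management API",
   "payment processing API",
   "data analytics and metrics API",
   "notification and messaging API"]

-- Source B's _rank: index of the first marker contained in d, else len(_MARKERS); List.findIdx returns the length when no match.
def pvRankB (d : String) : Nat := pvMarkers.findIdx (fun m => PySem.Str.isIn m d)

-- Source B's rank loop: fold the per-dependency ranks with min, starting from 4.
def pvRankFold (dependencies : List String) : Nat :=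
  dependencies.foldl (fun r dep => Nat.min r (pvRankB (PySem.Str.lower dep))) 4

def pvFrameworkB (rank : Nat) (language : String) : String :=
  if rank < 4 then pvNames.getD rank language else language

-- Source B's best loop: fold the flattened keyword table with min over matched categories.
def pvBest (name_l : String) : Nat :=
  pvKeywords.foldl (fun b kc => if PySem.Str.isIn kc.1 name_l then Nat.min b kc.2 else b) 4

def pvDescB (framework : String) (best : Nat) : String :=
  if best < 4 then "A " ++ framework ++ " " ++ pvSuffixes.getD best ""
  else "A RESTful API service built with " ++ framework

def generate_api_description_py_alt (repo_name : String) (dependencies : List String) (language : String) : String :=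
  pvDescB (pvFrameworkB (pvRankFold dependencies) language) (pvBest (PySem.Str.lower repo_name))

-- ===== PRECONDITION & SPEC =====
def Spec_generate_api_description_py (repo_name : String) (dependencies : List String) (language : String) (out : String) : Prop := out = generate_api_description_py_alt repo_name dependencies language
instance (repo_name : String) (dependencies : List String) (language : String) (out : String) : Decidable (Spec_generate_api_description_py repo_name dependencies language out) := by unfold Spec_generate_api_description_py; infer_instance

-- ===== CLAIM (what is proved, stated in full; the proofs are below) =====
def Claim_equal_generate_api_description_py : Prop := ∀ (repo_name : String) (dependencies : List String) (language : String), Dom_generate_api_description_py repo_name dependencies language → Spec_generate_api_description_py repo_name dependencies language (generate_api_description_py repo_name dependencies language)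

-- ===== LEMMAS AND PROOFS =====

-- A's framework cascade written as a Nat priority (proof-only helper).
def pvCasc (deps : List String) : Nat :=
  if deps.any (fun dep => PySem.Str.isIn "fastapi" (PySem.Str.lower dep)) then 0
  else if deps.any (fun dep => PySem.Str.isIn "flask" (PySem.Str.lower dep)) then 1
  else if deps.any (fun dep => PySem.Str.isIn "express" (PySem.Str.lower dep)) then 2
  else if deps.any (fun dep => PySem.Str.isIn "django" (PySem.Str.lower dep)) then 3
  else 4

lemma pvCasc_le (deps : List String) : pvCasc deps ≤ 4 := by
  unfold pvCasc; split_ifs <;> omega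

set_option maxHeartbeats 2000000 in
lemma rank_fold (deps : List String) (a : Nat) (ha : a ≤ 4) :
    deps.foldl (fun r dep => Nat.min r (pvRankB (PySem.Str.lower dep))) a
      = Nat.min a (pvCasc deps) := by
  induction deps generalizing a with
  | nil =>
    simp only [List.foldl_nil, pvCasc, List.any_nil, Bool.false_eq_true, if_false, Nat.min_def]
    split_ifs <;> omega
  | cons d t ih =>
    simp only [List.foldl_cons]
    rw [ih _ (by simp only [Nat.min_def]; split_ifs <;> omega)]
    simp only [pvCasc, List.any_cons, pvRankB, pvMarkers, List.findIdx_cons, List.findIdx_nil,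
      Bool.cond_eq_ite]
    by_cases h1 : PySem.Str.isIn "fastapi" (PySem.Str.lower d) <;>
    by_cases h2 : PySem.Str.isIn "flask" (PySem.Str.lower d) <;>
    by_cases h3 : PySem.Str.isIn "express" (PySem.Str.lower d) <;>
    by_cases h4 : PySem.Str.isIn "django" (PySem.Str.lower d) <;>
      simp only [h1, h2, h3, h4, Bool.true_or, Bool.false_or, Bool.false_eq_true, if_true, if_false,
        Nat.min_def] <;>
      split_ifs <;> omega

lemma rankFold_eq (deps : List String) : pvRankFold deps = pvCasc deps := by
  unfold pvRankFold
  rw [rank_fold deps 4 (by omega)]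
  have := pvCasc_le deps
  simp only [Nat.min_def]
  split_ifs <;> omega

set_option maxHeartbeats 1000000 in
lemma group_fold (s : String) (b : Nat) (k1 k2 k3 : String) (c : Nat) :
    List.foldl (fun b kc => if PySem.Str.isIn kc.1 s then Nat.min b kc.2 else b) b
        [(k1, c), (k2, c), (k3, c)]
      = if (PySem.Str.isIn k1 s || (PySem.Str.isIn k2 s || PySem.Str.isIn k3 s)) then Nat.min b c
        else b := by
  simp only [List.foldl_cons, List.foldl_nil]
  by_cases h1 : PySem.Str.isIn k1 s <;>
  by_cases h2 : PySem.Str.isIn k2 s <;>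
  by_cases h3 : PySem.Str.isIn k3 s <;>
    simp only [h1, h2, h3, Bool.true_or, Bool.false_or, Bool.false_eq_true, if_true, if_false,
      Nat.min_def] <;>
    split_ifs <;> omega

set_option maxHeartbeats 1000000 in
lemma best_char (s : String) :
    pvBest s
      = if (PySem.Str.isIn "auth" s || (PySem.Str.isIn "login" s || PySem.Str.isIn "user" s)) then 0
        else if (PySem.Str.isIn "payment" s || (PySem.Str.isIn "billing" s || PySem.Str.isIn "transaction" s)) then 1
        else if (PySem.Str.isIn "data" s || (PySem.Str.isIn "analytics" s || PySem.Str.isIn "metrics" s)) then 2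
        else if (PySem.Str.isIn "notification" s || (PySem.Str.isIn "email" s || PySem.Str.isIn "sms" s)) then 3
        else 4 := by
  unfold pvBest
  rw [show pvKeywords
        = [("auth", 0), ("login", 0), ("user", 0)]
          ++ ([("payment", 1), ("billing", 1), ("transaction", 1)]
          ++ ([("data", 2), ("analytics", 2), ("metrics", 2)]
          ++ [("notification", 3), ("email", 3), ("sms", 3)])) from rfl,
     List.foldl_append, List.foldl_append, List.foldl_append,
     group_fold, group_fold, group_fold, group_fold]
  split_ifs <;> rfl

-- ===== VERDICT (by name: the statement is the Claim_ definition above) =====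
set_option maxHeartbeats 2000000 in
theorem generate_api_description_py_spec : Claim_equal_generate_api_description_py := by
  intro repo_name dependencies language _
  unfold Spec_generate_api_description_py generate_api_description_py generate_api_description_py_alt
    pvDescA pvDescB pvFrameworkB
  rw [rankFold_eq, best_char]
  simp only [List.any_cons, List.any_nil, Bool.or_false]
  unfold pvCasc
  split_ifs <;> first | rfl | omega | simp [pvSuffixes, String.append_assoc]
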